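-- pv_equiv track=rewrite | github.com/baiweichihu/UST-Coursemap | app.py | _related_relations
-- ===== SOURCE A (Python) =====
-- from typing import Any, Optional
--
-- def _related_relations(payload: dict[str, Any], node_id: Optional[str]) -> dict[str, list[str]]:
--     out = {
--         "pre_reqs": [],
--         "co_reqs": [],
--         "exclusions": [],
--         "required_by": [],
--         "corequired_by": [],
--         "excluded_by": [],
--     }
--     if not node_id:
--         return out
--
--     for edge in payload.get("edges", []):
--         src = str(edge.get("source", ""))
--         tgt = str(edge.get("target", ""))
--         relation = str(edge.get("relation", ""))
--         if relation == "pre_req":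
--             if tgt == node_id:
--                 out["pre_reqs"].append(src)
--             if src == node_id:
--                 out["required_by"].append(tgt)
--         elif relation == "co_req":
--             if tgt == node_id:
--                 out["co_reqs"].append(src)
--             if src == node_id:
--                 out["corequired_by"].append(tgt)
--         elif relation == "exclusion":
--             if src == node_id:
--                 out["exclusions"].append(tgt)
--             if tgt == node_id:
--                 out["excluded_by"].append(src)
--
--     for key in out:
--         out[key] = sorted(set(out[key]))
--     return out
-- ===== SOURCE B (Python) =====
-- def _related_relations(payload, node_id):
--     if not node_id:
--         return {"pre_reqs": [], "co_reqs": [], "exclusions": [],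
--                 "required_by": [], "corequired_by": [], "excluded_by": []}
--     edges = payload.get("edges", [])
--
--     def pick(rel, match_key, emit_key):
--         return sorted({str(e.get(emit_key, "")) for e in edges
--                        if str(e.get("relation", "")) == rel
--                        and str(e.get(match_key, "")) == node_id})
--
--     return {
--         "pre_reqs": pick("pre_req", "target", "source"),
--         "co_reqs": pick("co_req", "target", "source"),
--         "exclusions": pick("exclusion", "source", "target"),
--         "required_by": pick("pre_req", "source", "target"),
--         "corequired_by": pick("co_req", "source", "target"),
--         "excluded_by": pick("exclusion", "target", "source"),
--     }
-- ===== Notes on version B (the rewrite author's own statement) =====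
-- stated objective: alternative
-- what changed: Replaces A's single loop with if/elif dispatch into six mutable buckets by six independent sorted-set comprehensions, one per output key, each filtering the edge list on its relation and matching endpoint.
import Mathlib
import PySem

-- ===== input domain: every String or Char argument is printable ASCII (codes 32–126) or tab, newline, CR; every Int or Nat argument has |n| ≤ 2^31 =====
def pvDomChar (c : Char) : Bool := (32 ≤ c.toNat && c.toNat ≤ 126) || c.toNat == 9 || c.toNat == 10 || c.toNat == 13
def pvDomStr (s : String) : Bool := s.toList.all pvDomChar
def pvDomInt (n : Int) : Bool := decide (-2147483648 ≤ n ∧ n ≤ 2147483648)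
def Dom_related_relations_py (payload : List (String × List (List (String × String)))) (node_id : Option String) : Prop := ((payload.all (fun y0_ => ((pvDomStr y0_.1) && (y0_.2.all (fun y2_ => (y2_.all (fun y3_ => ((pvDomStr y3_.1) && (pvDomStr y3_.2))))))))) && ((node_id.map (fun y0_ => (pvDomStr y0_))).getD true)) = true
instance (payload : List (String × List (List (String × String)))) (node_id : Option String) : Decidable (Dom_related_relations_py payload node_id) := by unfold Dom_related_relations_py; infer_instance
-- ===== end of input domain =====

-- B rebuilds each of the six buckets independently by its own filter/set/sort pass
-- over the edges (alternative decomposition: six scans, no mutable dispatch loop).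

-- ===== PORT A =====
-- the six mutable buckets of A's single loop, in A's insertion order
structure PvBuckets where
  pre : List String
  co : List String
  ex : List String
  rq : List String
  cq : List String
  eb : List String
deriving Repr, DecidableEq

def pvEGet (e : List (String × String)) (k : String) : String :=
  PySem.Dict.getD ⟨e⟩ k ""

def pvStepA (nid : String) (b : PvBuckets) (edge : List (String × String)) : PvBuckets :=
  let src := pvEGet edge "source"
  let tgt := pvEGet edge "target"
  let rel := pvEGet edge "relation"
  if rel = "pre_req" then
    { b with pre := if tgt = nid then b.pre ++ [src] else b.pre,
             rq := if src = nid then b.rq ++ [tgt] else b.rq }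
  else if rel = "co_req" then
    { b with co := if tgt = nid then b.co ++ [src] else b.co,
             cq := if src = nid then b.cq ++ [tgt] else b.cq }
  else if rel = "exclusion" then
    { b with ex := if src = nid then b.ex ++ [tgt] else b.ex,
             eb := if tgt = nid then b.eb ++ [src] else b.eb }
  else b

-- sorted(set(l)) of the final pass over out
def pvSortSet (l : List String) : List String :=
  PySem.List.sorted (PySem.Set.ofList l) (fun x => x) false

def related_relations_py (payload : List (String × List (List (String × String)))) (node_id : Option String) : List (String × List String) :=
  if node_id = none ∨ node_id = some "" then
    [("pre_reqs", []), ("co_reqs", []), ("exclusions", []),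
     ("required_by", []), ("corequired_by", []), ("excluded_by", [])]
  else
    let nid := node_id.getD ""
    let edges := PySem.Dict.getD ⟨payload⟩ "edges" []
    let b := edges.foldl (pvStepA nid) ⟨[], [], [], [], [], []⟩
    [("pre_reqs", pvSortSet b.pre), ("co_reqs", pvSortSet b.co),
     ("exclusions", pvSortSet b.ex), ("required_by", pvSortSet b.rq),
     ("corequired_by", pvSortSet b.cq), ("excluded_by", pvSortSet b.eb)]

-- ===== PORT B =====
-- B's pick(rel, match_key, emit_key): sorted set comprehension over the edges
def pvPick (edges : List (List (String × String))) (nid rel matchKey emitKey : String) : List String :=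
  PySem.List.sorted
    (PySem.Set.ofList (edges.filterMap (fun e =>
      if pvEGet e "relation" = rel ∧ pvEGet e matchKey = nid
      then some (pvEGet e emitKey) else none)))
    (fun x => x) false

def related_relations_py_alt (payload : List (String × List (List (String × String)))) (node_id : Option String) : List (String × List String) :=
  if node_id = none ∨ node_id = some "" then
    [("pre_reqs", []), ("co_reqs", []), ("exclusions", []),
     ("required_by", []), ("corequired_by", []), ("excluded_by", [])]
  else
    let nid := node_id.getD ""
    let edges := PySem.Dict.getD ⟨payload⟩ "edges" []
    [("pre_reqs", pvPick edges nid "pre_req" "target" "source"),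
     ("co_reqs", pvPick edges nid "co_req" "target" "source"),
     ("exclusions", pvPick edges nid "exclusion" "source" "target"),
     ("required_by", pvPick edges nid "pre_req" "source" "target"),
     ("corequired_by", pvPick edges nid "co_req" "source" "target"),
     ("excluded_by", pvPick edges nid "exclusion" "target" "source")]

-- ===== PRECONDITION & SPEC =====
def Spec_related_relations_py (payload : List (String × List (List (String × String)))) (node_id : Option String) (out : List (String × List String)) : Prop := out = related_relations_py_alt payload node_id
instance (payload : List (String × List (List (String × String)))) (node_id : Option String) (out : List (String × List String)) : Decidable (Spec_related_relations_py payload node_id out) := by unfold Spec_related_relations_py; infer_instance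

-- ===== CLAIM (what is proved, stated in full; the proofs are below) =====
def Claim_equal_related_relations_py : Prop := ∀ (payload : List (String × List (List (String × String)))) (node_id : Option String), Dom_related_relations_py payload node_id → Spec_related_relations_py payload node_id (related_relations_py payload node_id)

-- ===== LEMMAS AND PROOFS =====
def pvF (nid rel matchKey emitKey : String) (e : List (String × String)) : Option String :=
  if pvEGet e "relation" = rel ∧ pvEGet e matchKey = nid
  then some (pvEGet e emitKey) else none

theorem pvFold_eq (nid : String) (edges : List (List (String × String))) (b : PvBuckets) :
    edges.foldl (pvStepA nid) b =
      ⟨b.pre ++ edges.filterMap (pvF nid "pre_req" "target" "source"),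
       b.co ++ edges.filterMap (pvF nid "co_req" "target" "source"),
       b.ex ++ edges.filterMap (pvF nid "exclusion" "source" "target"),
       b.rq ++ edges.filterMap (pvF nid "pre_req" "source" "target"),
       b.cq ++ edges.filterMap (pvF nid "co_req" "source" "target"),
       b.eb ++ edges.filterMap (pvF nid "exclusion" "target" "source")⟩ := by
  induction edges generalizing b with
  | nil => simp
  | cons e rest ih =>
    simp only [List.foldl_cons, ih]
    simp only [pvStepA, pvF]
    by_cases h1 : pvEGet e "relation" = "pre_req" <;>
    by_cases h2 : pvEGet e "relation" = "co_req" <;>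
    by_cases h3 : pvEGet e "relation" = "exclusion" <;>
    by_cases h4 : pvEGet e "target" = nid <;>
    by_cases h5 : pvEGet e "source" = nid <;>
    simp_all [List.append_assoc]

-- ===== VERDICT (by name: the statement is the Claim_ definition above) =====
theorem related_relations_py_spec : Claim_equal_related_relations_py := by
  intro payload node_id _
  unfold Spec_related_relations_py related_relations_py related_relations_py_alt
  by_cases h : node_id = none ∨ node_id = some ""
  · simp [h]
  · simp only [if_neg h]
    rw [pvFold_eq]
    simp [pvPick, pvF, pvSortSet]
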